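-- pv_equiv track=rewrite | github.com/miliar/Code_Jam_Webscraper | solutions_python/solutions_year15_round0_nr1/1774.py | total_clappers
-- ===== SOURCE A (Python) =====
-- def total_clappers(audiences):
--     clappers = 0
--     non_clapper = -1
--     for i in range(0, len(audiences)):
--         if clappers >= i:
--             clappers += audiences[i]
--         else:
--             if audiences[i] != 0:
--                 non_clapper = i
--                 break
--     return clappers, non_clapper
-- ===== SOURCE B (Python) =====
-- def total_clappers(audiences):
--     # Build the prefix-sum array once; then the answer is read off it:
--     # the break point is the first i with prefix[i] < i, and the
--     # non-clapper is the first nonzero entry at or after that point.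
--     n = len(audiences)
--     prefix = [0]
--     for x in audiences:
--         prefix.append(prefix[-1] + x)
--     i0 = next((i for i in range(n) if prefix[i] < i), None)
--     if i0 is None:
--         return prefix[n], -1
--     non_clapper = next((j for j in range(i0, n) if audiences[j] != 0), -1)
--     return prefix[i0], non_clapper
-- ===== Notes on version B (the rewrite author's own statement) =====
-- stated objective: alternative
-- what changed: B builds the full prefix-sum array up front and then answers declaratively by two independent searches over it (first index with prefix[i] < i, then first nonzero at/after it), instead of A's single stateful loop that interleaves accumulation with the break/scan logic.
import Mathlib
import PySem

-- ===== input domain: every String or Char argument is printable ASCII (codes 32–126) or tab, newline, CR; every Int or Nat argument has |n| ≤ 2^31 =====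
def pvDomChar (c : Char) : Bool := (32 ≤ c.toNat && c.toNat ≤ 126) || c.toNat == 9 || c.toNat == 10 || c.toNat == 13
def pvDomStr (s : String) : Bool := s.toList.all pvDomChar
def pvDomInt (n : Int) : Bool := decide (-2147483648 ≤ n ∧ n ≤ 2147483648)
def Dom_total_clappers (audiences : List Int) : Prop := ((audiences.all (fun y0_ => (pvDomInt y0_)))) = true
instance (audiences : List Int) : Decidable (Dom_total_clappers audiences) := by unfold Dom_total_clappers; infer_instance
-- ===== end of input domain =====

-- B builds the prefix-sum array up front and reads the answer off it by two independent searches; same O(n) cost, different structure.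

-- ===== PORT A =====
-- A's single loop: state clappers, index i; accumulate while clappers ≥ i, then break at the first nonzero.
def tcLoopA : List Int → Nat → Int → Int × Int
  | [], _, clappers => (clappers, -1)
  | a :: rest, i, clappers =>
    if clappers ≥ (i : Int) then tcLoopA rest (i + 1) (clappers + a)
    else if a ≠ 0 then (clappers, (i : Int))
    else tcLoopA rest (i + 1) clappers

def total_clappers (audiences : List Int) : Int × Int :=
  tcLoopA audiences 0 0

-- ===== PORT B =====
-- Source B's loop `for x in audiences: prefix.append(prefix[-1] + x)` (prefix starts [0], always nonempty).
def tcBuildPrefix : List Int → List Int → List Int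
  | pfx, [] => pfx
  | pfx, x :: rest => tcBuildPrefix (pfx ++ [pfx.getLastD 0 + x]) rest

-- Source B's `next((i for i in range(n) if …), default)` searches are ported as find? over the same ranges.
def total_clappers_alt (audiences : List Int) : Int × Int :=
  let n := audiences.length
  let pfx := tcBuildPrefix [0] audiences
  match (List.range n).find? (fun i => decide (pfx.getD i 0 < (i : Int))) with
  | none => (pfx.getD n 0, -1)
  | some i0 =>
    match (List.range' i0 (n - i0)).find? (fun j => decide (audiences.getD j 0 ≠ 0)) with
    | none => (pfx.getD i0 0, -1)
    | some j => (pfx.getD i0 0, (j : Int))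

-- ===== PRECONDITION & SPEC =====
def Spec_total_clappers (audiences : List Int) (out : Int × Int) : Prop := out = total_clappers_alt audiences
instance (audiences : List Int) (out : Int × Int) : Decidable (Spec_total_clappers audiences out) := by unfold Spec_total_clappers; infer_instance

-- ===== CLAIM (what is proved, stated in full; the proofs are below) =====
def Claim_equal_total_clappers : Prop := ∀ (audiences : List Int), Dom_total_clappers audiences → Spec_total_clappers audiences (total_clappers audiences)

-- ===== LEMMAS AND PROOFS =====

-- Proof-side intermediate: A's loop split into its two regimes.
def tcPhase1 : List Int → Nat → Int → Int × Option Nat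
  | [], _, clappers => (clappers, none)
  | a :: rest, i, clappers =>
    if clappers < (i : Int) then (clappers, some i)
    else tcPhase1 rest (i + 1) (clappers + a)

def tcPhase2 : List Int → Nat → Int
  | [], _ => -1
  | a :: rest, j => if a ≠ 0 then (j : Int) else tcPhase2 rest (j + 1)

-- Proof-side: the partial sums starting after c.
def tcSums (c : Int) : List Int → List Int
  | [] => []
  | x :: rest => (c + x) :: tcSums (c + x) rest

-- Once clappers < i, A's loop only scans for the first nonzero.
theorem tcLoopA_stuck (xs : List Int) : ∀ (i : Nat) (c : Int), c < (i : Int) →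
    tcLoopA xs i c = (c, tcPhase2 xs i) := by
  induction xs with
  | nil => intro i c _; simp [tcLoopA, tcPhase2]
  | cons a rest ih =>
    intro i c h
    simp only [tcLoopA, tcPhase2, if_neg (not_le.mpr h)]
    by_cases ha : a ≠ 0
    · simp [ha]
    · simp only [ha]
      rw [ih (i + 1) c (by push_cast; omega)]
      simp

theorem tcPhase1_ge (xs : List Int) : ∀ (i : Nat) (c : Int) (c' : Int) (i0 : Nat),
    tcPhase1 xs i c = (c', some i0) → i ≤ i0 := by
  induction xs with
  | nil => intro i c c' i0 h; simp [tcPhase1] at h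
  | cons a rest ih =>
    intro i c c' i0 h
    simp only [tcPhase1] at h
    split at h
    · cases h; omega
    · exact Nat.le_of_succ_le (ih (i + 1) (c + a) c' i0 h)

-- A's loop equals the two regimes glued together.
theorem tcLoopA_eq (xs : List Int) : ∀ (i : Nat) (c : Int),
    tcLoopA xs i c =
      (match tcPhase1 xs i c with
       | (c', none) => (c', -1)
       | (c', some i0) => (c', tcPhase2 (xs.drop (i0 - i)) i0)) := by
  induction xs with
  | nil => intro i c; simp [tcLoopA, tcPhase1]
  | cons a rest ih =>
    intro i c
    by_cases h : c ≥ (i : Int)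
    · simp only [tcLoopA, if_pos h, tcPhase1, if_neg (not_lt.mpr h)]
      rw [ih (i + 1) (c + a)]
      cases hp : tcPhase1 rest (i + 1) (c + a) with
      | mk c' o =>
        cases o with
        | none => simp
        | some i0 =>
          have hge : i + 1 ≤ i0 := tcPhase1_ge rest (i + 1) (c + a) c' i0 hp
          simp only
          have hdrop : (a :: rest).drop (i0 - i) = rest.drop (i0 - (i + 1)) := by
            have : i0 - i = (i0 - (i + 1)) + 1 := by omega
            rw [this]; rfl
          rw [hdrop]
    · have h' : c < (i : Int) := not_le.mp h
      simp only [tcPhase1, if_pos h']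
      rw [tcLoopA_stuck (a :: rest) i c h']
      simp

-- find? respects pointwise-equal-on-members predicates.
theorem find?_congr_mem {α : Type} (l : List α) (p q : α → Bool)
    (h : ∀ a ∈ l, p a = q a) : l.find? p = l.find? q := by
  induction l with
  | nil => rfl
  | cons x rest ih =>
    simp only [List.find?_cons]
    rw [h x (List.mem_cons_self), ih (fun a ha => h a (List.mem_cons_of_mem _ ha))]

-- The prefix list built by Source B is the starting list plus the partial sums from its last element.
theorem tcBuildPrefix_eq (xs : List Int) : ∀ (pfx : List Int) (y : Int),
    tcBuildPrefix (pfx ++ [y]) xs = (pfx ++ [y]) ++ tcSums y xs := by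
  induction xs with
  | nil => intro pfx y; simp [tcBuildPrefix, tcSums]
  | cons x rest ih =>
    intro pfx y
    have hl : (pfx ++ [y]).getLastD 0 = y := by
      simp
    simp only [tcBuildPrefix, hl]
    rw [show (pfx ++ [y]) ++ [y + x] = (pfx ++ [y]) ++ [y + x] from rfl]
    rw [ih (pfx ++ [y]) (y + x)]
    simp [tcSums]

-- Indexing the prefix list gives take-sums.
theorem tcSums_getD (xs : List Int) : ∀ (c : Int) (i : Nat), i ≤ xs.length →
    (c :: tcSums c xs).getD i 0 = c + (xs.take i).sum := by
  induction xs with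
  | nil =>
    intro c i hi
    have : i = 0 := by simpa using hi
    subst this
    simp [tcSums]
  | cons x rest ih =>
    intro c i hi
    cases i with
    | zero => simp
    | succ i' =>
      have := ih (c + x) i' (by simpa using hi)
      simp only [tcSums, List.getD, List.take, List.sum_cons]
      simpa [List.getD, add_assoc] using this


-- tcPhase1 characterised by the first index whose take-sum breaks the standing condition.
theorem tcPhase1_char (xs : List Int) : ∀ (i : Nat) (c : Int),
    tcPhase1 xs i c =
      (match (List.range xs.length).find?
          (fun k => decide (c + (xs.take k).sum < (i : Int) + (k : Int))) with
       | none => (c + xs.sum, none)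
       | some k => (c + (xs.take k).sum, some (i + k))) := by
  induction xs with
  | nil => intro i c; simp [tcPhase1]
  | cons a rest ih =>
    intro i c
    rw [List.length_cons, List.range_succ_eq_map]
    simp only [List.find?_cons]
    by_cases h : c < (i : Int)
    · have hp : (decide (c + ((a :: rest).take 0).sum < (i : Int) + ((0 : Nat) : Int))) = true := by
        simp [h]
      simp [tcPhase1, h]
    · have hp : (decide (c + ((a :: rest).take 0).sum < (i : Int) + ((0 : Nat) : Int))) = false := by
        simp at h ⊢; omega
      rw [hp]
      simp only [tcPhase1, if_neg h]
      rw [ih (i + 1) (c + a)]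
      rw [List.find?_map]
      have hpred : ∀ k ∈ List.range rest.length,
          (fun k => decide (c + a + (rest.take k).sum < ((i + 1 : Nat) : Int) + (k : Int))) k =
          ((fun k => decide (c + ((a :: rest).take k).sum < (i : Int) + (k : Int))) ∘ Nat.succ) k := by
        intro k _
        simp only [Function.comp, List.take_succ_cons, List.sum_cons, decide_eq_decide]
        push_cast
        omega
      rw [find?_congr_mem _ _ _ hpred]
      cases hf : (List.range rest.length).find?
          ((fun k => decide (c + ((a :: rest).take k).sum < (i : Int) + (k : Int))) ∘ Nat.succ) with
      | none => simp [add_assoc]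
      | some k =>
        simp only [Option.map_some, Nat.succ_eq_add_one, List.take_succ_cons, List.sum_cons,
          Prod.mk.injEq]
        refine ⟨by ring, by rw [Option.some_inj]; omega⟩

-- tcPhase2 on a suffix characterised by the first nonzero index at or after j0.
theorem tcPhase2_char (xs : List Int) : ∀ (fuel : Nat) (j0 : Nat), xs.length - j0 = fuel →
    tcPhase2 (xs.drop j0) j0 =
      (match (List.range' j0 (xs.length - j0)).find? (fun j => decide (xs.getD j 0 ≠ 0)) with
       | none => -1
       | some j => (j : Int)) := by
  intro fuel
  induction fuel with
  | zero =>
    intro j0 h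
    have hle : xs.length ≤ j0 := by omega
    rw [List.drop_eq_nil_of_le hle, h]
    simp [tcPhase2]
  | succ m ih =>
    intro j0 h
    have hlt : j0 < xs.length := by omega
    rw [List.drop_eq_getElem_cons hlt, h, List.range'_succ, List.find?_cons]
    by_cases hz : xs[j0] = 0
    · have hd : (decide (xs.getD j0 0 ≠ 0)) = false := by
        simp [List.getD, List.getElem?_eq_getElem hlt, hz]
      rw [hd]
      have h2 := ih (j0 + 1) (by omega)
      rw [show xs.length - (j0 + 1) = m from by omega] at h2
      simpa [tcPhase2, hz] using h2
    · have hd : (decide (xs.getD j0 0 ≠ 0)) = true := by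
        simp [List.getD, List.getElem?_eq_getElem hlt, hz]
      rw [hd]
      simp [tcPhase2, hz]

-- ===== VERDICT (by name: the statement is the Claim_ definition above) =====
theorem total_clappers_spec : Claim_equal_total_clappers := by
  intro xs _
  simp only [Spec_total_clappers, total_clappers, total_clappers_alt]
  have hpfx : tcBuildPrefix [0] xs = (0 : Int) :: tcSums 0 xs := by
    have := tcBuildPrefix_eq xs [] 0
    simpa using this
  rw [tcLoopA_eq xs 0 0, tcPhase1_char xs 0 0, hpfx]
  have hpred : ∀ k ∈ List.range xs.length,
      (fun i => decide ((((0 : Int) :: tcSums 0 xs).getD i 0) < (i : Int))) k =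
      (fun k => decide ((0 : Int) + (xs.take k).sum < ((0 : Nat) : Int) + (k : Int))) k := by
    intro k hk
    have hk' : k ≤ xs.length := le_of_lt (List.mem_range.mp hk)
    show decide ((((0 : Int) :: tcSums 0 xs).getD k 0) < (k : Int)) =
      decide ((0 : Int) + (xs.take k).sum < ((0 : Nat) : Int) + (k : Int))
    rw [tcSums_getD xs 0 k hk']
    simp
  rw [find?_congr_mem _ _ _ hpred]
  cases hf : (List.range xs.length).find?
      (fun k => decide ((0 : Int) + (xs.take k).sum < ((0 : Nat) : Int) + (k : Int))) with
  | none =>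
    simp only
    rw [tcSums_getD xs 0 xs.length (le_refl _)]
    simp
  | some i0 =>
    have hi0 : i0 < xs.length := List.mem_range.mp (List.mem_of_find?_eq_some hf)
    simp only [Nat.zero_add, Nat.sub_zero]
    rw [tcSums_getD xs 0 i0 (le_of_lt hi0)]
    rw [tcPhase2_char xs (xs.length - i0) i0 rfl]
    cases (List.range' i0 (xs.length - i0)).find? (fun j => decide (xs.getD j 0 ≠ 0)) <;> simp
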